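-- pv_equiv track=rewrite | github.com/k-harada/AtCoder | AGC040/C.py | solve
-- ===== SOURCE A (Python) =====
-- LARGE = 998244353
--
-- def solve(n):
--     r = 0
--     mck = 1
--     factorial_n = 1
--     factorial_inv = [0] * (n + 1)
--     factorial_inv[0] = 1
--     for i in range(1, n + 1):
--         factorial_n *= i
--         factorial_n %= LARGE
--     factorial_inv[-1] = pow(factorial_n, LARGE - 2, LARGE)
--     for i in range(n):
--         factorial_inv[n - i - 1] = (factorial_inv[n - i] * (n - i)) % LARGE
--     pow_2 = 1
--     for k in range(n // 2):
--         r += factorial_n * factorial_inv[n - k] * factorial_inv[k] * pow_2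
--         r %= LARGE
--         pow_2 *= 2
--         pow_2 %= LARGE
--     res = (pow(3, n, LARGE) - (2 * r)) % LARGE
--     return res
-- ===== SOURCE B (Python) =====
-- LARGE = 998244353
--
-- def solve(n):
--     # No inverse-factorial table: one forward pass builds the terms
--     # falling_factorial(n,k) * 2^k, one backward pass multiplies them by the
--     # suffix products n!/k! (pure multiplications), and the single Fermat
--     # inverse of n! is applied once at the end.
--     m = n // 2
--     q = 1
--     for i in range(m + 1, n + 1):   # q = (m+1)*(m+2)*...*n mod p
--         q = q * i % LARGE
--     ts = []
--     ff = 1                          # ff = n*(n-1)*...*(n-k+1) mod p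
--     pw = 1                          # pw = 2^k mod p
--     for k in range(m):
--         ts.append(ff * pw % LARGE)
--         ff = ff * (n - k) % LARGE
--         pw = pw * 2 % LARGE
--     s = 0
--     for k in range(m - 1, -1, -1):
--         q = q * (k + 1) % LARGE     # q = (k+1)*(k+2)*...*n mod p
--         s = (s + ts[k] * q) % LARGE
--     # now q = n! mod p (the backward pass finished the factorial)
--     inv = pow(q, LARGE - 2, LARGE)
--     r = q * inv % LARGE * inv % LARGE * s % LARGE
--     return (pow(3, n, LARGE) - 2 * r) % LARGE
-- ===== Notes on version B (the rewrite author's own statement) =====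
-- stated objective: faster
-- what changed: B drops A's O(n) inverse-factorial table and its two build loops: a forward pass accumulates the falling factorial n(n-1)...(n-k+1) times 2^k, a backward pass multiplies each term by the suffix product (k+1)...n (finishing n! on the way down), and a single Fermat inverse is applied once at the end.
import Mathlib
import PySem

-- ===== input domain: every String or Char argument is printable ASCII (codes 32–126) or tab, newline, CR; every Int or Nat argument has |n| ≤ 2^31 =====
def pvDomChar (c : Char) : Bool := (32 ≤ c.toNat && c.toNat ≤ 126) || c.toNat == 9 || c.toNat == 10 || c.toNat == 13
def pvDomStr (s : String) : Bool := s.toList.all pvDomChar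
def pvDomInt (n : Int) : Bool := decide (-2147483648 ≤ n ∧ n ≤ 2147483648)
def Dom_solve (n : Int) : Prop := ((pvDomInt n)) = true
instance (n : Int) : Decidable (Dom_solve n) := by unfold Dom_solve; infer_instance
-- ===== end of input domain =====

-- B replaces A's inverse-factorial table by a forward falling-factorial pass and a
-- backward suffix-product pass with ONE modular inverse at the end (objective: faster
-- by a constant factor: fewer modular multiplications and no O(n) table).
-- Python `%` below is on the positive literal divisor 998244353, where Lean's `%`
-- (emod) agrees with Python's `%` exactly (PySem.Int.mod_eq_emod_of_pos).

-- ===== PORT A =====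
-- Python's three-argument pow(b, e, m) for m > 0, ported by hand as binary modular
-- exponentiation (what CPython runs); exact: returns b^e mod m in [0, m), which is
-- powModFast's value, computed in O(log e) multiplications instead of b^e.
def powModFast (b : Int) (e : Nat) (m : Int) : Int :=
  if e = 0 then 1 % m
  else
    let r := powModFast (b * b % m) (e / 2) m
    if e % 2 = 1 then r * (b % m) % m else r
decreasing_by omega

def solve (n : Int) : Int :=
  -- r = 0; mck = 1 (mck is never used); factorial_n accumulated over range(1, n+1)
  let factorial_n : Int :=
    (PySem.List.pyRange 1 (n + 1) 1).foldl (fun f i => f * i % 998244353) 1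
  -- factorial_inv = [0] * (n + 1); factorial_inv[0] = 1; factorial_inv[-1] = pow(factorial_n, LARGE-2, LARGE)
  -- (for n < 0 Python raises IndexError at `factorial_inv[0] = 1`: excluded by Pre_solve)
  let finv0 : List Int := List.replicate (n + 1).toNat 0
  let finv1 := PySem.List.pySetD finv0 0 1
  let finv2 := PySem.List.pySetD finv1 (-1)
      (powModFast factorial_n 998244351 998244353)
  let finv := (PySem.List.pyRange 0 n 1).foldl
      (fun l i =>
        PySem.List.pySetD l (n - i - 1)
          (PySem.List.pyGetD l (n - i) 0 * (n - i) % 998244353)) finv2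
  -- pow_2 = 1; for k in range(n // 2): r = (r + ...) % LARGE; pow_2 = pow_2 * 2 % LARGE
  let rp := (PySem.List.pyRange 0 (PySem.Int.floordiv n 2) 1).foldl
      (fun (st : Int × Int) k =>
        ((st.1 + factorial_n * PySem.List.pyGetD finv (n - k) 0
            * PySem.List.pyGetD finv k 0 * st.2) % 998244353,
         st.2 * 2 % 998244353)) (0, 1)
  -- pow(3, n, LARGE): n ≥ 0 under Pre_solve, so the exponent is n.toNat
  (powModFast 3 n.toNat 998244353 - 2 * rp.1) % 998244353

-- ===== PORT B =====
def solve_alt (n : Int) : Int :=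
  let m := PySem.Int.floordiv n 2
  -- q = (m+1)*(m+2)*...*n mod p
  let q1 : Int :=
    (PySem.List.pyRange (m + 1) (n + 1) 1).foldl (fun q i => q * i % 998244353) 1
  -- forward pass: ts[k] = ff * pw % p with ff the falling factorial, pw = 2^k
  let fwd := (PySem.List.pyRange 0 m 1).foldl
      (fun (st : List Int × Int × Int) k =>
        (st.1 ++ [st.2.1 * st.2.2 % 998244353],
         st.2.1 * (n - k) % 998244353,
         st.2.2 * 2 % 998244353)) ([], 1, 1)
  let ts := fwd.1
  -- backward pass: for k in range(m-1, -1, -1): q = q*(k+1) % p; s = (s + ts[k]*q) % p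
  let bwd := (PySem.List.pyRange (m - 1) (-1) (-1)).foldl
      (fun (st : Int × Int) k =>
        let q := st.1 * (k + 1) % 998244353
        (q, (st.2 + PySem.List.pyGetD ts k 0 * q) % 998244353)) (q1, 0)
  let q2 := bwd.1
  let s := bwd.2
  -- q2 = n! mod p; inv = pow(q2, LARGE-2, LARGE); r = q2 * inv^2 * s mod p
  let inv := powModFast q2 998244351 998244353
  let r := q2 * inv % 998244353 * inv % 998244353 * s % 998244353
  (powModFast 3 n.toNat 998244353 - 2 * r) % 998244353

-- ===== PRECONDITION & SPEC =====
-- Pre_solve excludes exactly the inputs n < 0 on which the Python A raises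
-- IndexError (factorial_inv is the empty list there and `factorial_inv[0] = 1` fails).
def Pre_solve (n : Int) : Prop := 0 ≤ n
instance (n : Int) : Decidable (Pre_solve n) := by unfold Pre_solve; infer_instance
def pvWitness_solve : Int := 7

def Spec_solve (n : Int) (out : Int) : Prop := out = solve_alt n
instance (n : Int) (out : Int) : Decidable (Spec_solve n out) := by unfold Spec_solve; infer_instance

-- ===== CLAIM (what is proved, stated in full; the proofs are below) =====
def Claim_equal_solve : Prop := ∀ (n : Int), Dom_solve n → Pre_solve n → Spec_solve n (solve n)

-- ===== LEMMAS AND PROOFS =====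

-- Casting an integer reduced mod 998244353 into ZMod 998244353 forgets the reduction.
lemma castP_emod (a : Int) :
    ((a % 998244353 : Int) : ZMod 998244353) = (a : ZMod 998244353) := by
  have h : ((998244353 : Int) : ZMod 998244353) = 0 := by
    rw [ZMod.intCast_zmod_eq_zero_iff_dvd]; norm_num
  calc ((a % 998244353 : Int) : ZMod 998244353)
      = ((a - 998244353 * (a / 998244353) : Int) : ZMod 998244353) := by rw [Int.emod_def]
    _ = (a : ZMod 998244353) := by
        have h2 : (998244353 : ZMod 998244353) = 0 := by
          have := ZMod.natCast_self 998244353; exact_mod_cast this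
        push_cast; rw [h2]; ring

-- Two reduced residues that agree in ZMod 998244353 are equal as integers.
lemma eq_of_cast_eq {a b : Int} (ha0 : 0 ≤ a) (ha1 : a < 998244353)
    (hb0 : 0 ≤ b) (hb1 : b < 998244353)
    (h : (a : ZMod 998244353) = (b : ZMod 998244353)) : a = b := by
  have := (ZMod.intCast_eq_intCast_iff a b 998244353).mp h
  have h2 : a % 998244353 = b % 998244353 := this
  rwa [Int.emod_eq_of_lt ha0 ha1, Int.emod_eq_of_lt hb0 hb1] at h2

-- suffix product (a+1)*(a+2)*...*n in ZMod 998244353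
def spn (n a : Int) : ZMod 998244353 :=
  ((PySem.List.pyRange (a + 1) (n + 1) 1).map (fun i => (Int.cast i : ZMod 998244353))).prod

lemma spn_of_ge (n a : Int) (h : n ≤ a) : spn n a = 1 := by
  unfold spn
  rw [PySem.List.pyRange_one_eq_nil (by omega)]
  simp

lemma spn_pred (n a : Int) (h : a ≤ n) :
    spn n (a - 1) = (a : ZMod 998244353) * spn n a := by
  unfold spn
  rw [show a - 1 + 1 = a by ring, PySem.List.pyRange_one_cons (by omega)]
  simp

-- the product-mod fold: bounds
lemma foldl_mul_mod_bounds (xs : List Int) (c : Int) (h0 : 0 ≤ c) (h1 : c < 998244353) :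
    0 ≤ xs.foldl (fun f i => f * i % 998244353) c ∧
      xs.foldl (fun f i => f * i % 998244353) c < 998244353 := by
  induction xs generalizing c with
  | nil => exact ⟨h0, h1⟩
  | cons x xs ih =>
      exact ih _ (Int.emod_nonneg _ (by norm_num)) (Int.emod_lt_of_pos _ (by norm_num))

-- the product-mod fold: value in ZMod
lemma cast_foldl_mul_mod (xs : List Int) (c : Int) :
    ((xs.foldl (fun f i => f * i % 998244353) c : Int) : ZMod 998244353)
      = (c : ZMod 998244353) * (xs.map (fun i => (Int.cast i : ZMod 998244353))).prod := by
  induction xs generalizing c with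
  | nil => simp
  | cons x xs ih =>
      simp only [List.foldl_cons, ih, castP_emod, Int.cast_mul, List.map_cons,
        List.prod_cons]
      ring

-- the factorial fold of A (and the suffix fold of B) compute suffix products
lemma cast_fact_fold (n a : Int) :
    (((PySem.List.pyRange (a + 1) (n + 1) 1).foldl (fun f i => f * i % 998244353) 1 : Int)
        : ZMod 998244353) = spn n a := by
  rw [cast_foldl_mul_mod]; unfold spn; simp

lemma finv_step (n : Int) (Iv : Int) (t : Nat) (ht : (t : Int) + 1 ≤ n)
    (L : List Int) (hlen : L.length = (n + 1).toNat)
    (hent : ∀ j : Int, n - t ≤ j → j ≤ n →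
      ((PySem.List.pyGetD L j 0 : Int) : ZMod 998244353) = (Iv : ZMod 998244353) * spn n j) :
    (PySem.List.pySetD L (n - t - 1)
        (PySem.List.pyGetD L (n - t) 0 * (n - t) % 998244353)).length = (n + 1).toNat ∧
    ∀ j : Int, n - ((t : Int) + 1) ≤ j → j ≤ n →
      ((PySem.List.pyGetD (PySem.List.pySetD L (n - t - 1)
          (PySem.List.pyGetD L (n - t) 0 * (n - t) % 998244353)) j 0 : Int) : ZMod 998244353)
        = (Iv : ZMod 998244353) * spn n j := by
  have hidx : (0 : Int) ≤ n - t - 1 := by omega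
  rw [PySem.List.pySetD_of_nonneg _ _ hidx]
  refine ⟨by simp [hlen], ?_⟩
  intro j h1 h2
  have hj0 : (0 : Int) ≤ j := by omega
  have hjlen : j < ((L.set (n - t - 1).toNat
      (PySem.List.pyGetD L (n - t) 0 * (n - t) % 998244353)).length : Int) := by
    simp [hlen]; omega
  rw [PySem.List.pyGetD_eq_getElem _ _ hj0 hjlen]
  simp only [List.getElem_set]
  by_cases hc : (n - t - 1).toNat = j.toNat
  · rw [if_pos hc]
    rw [castP_emod]
    push_cast
    rw [hent (n - t) (by omega) (by omega)]
    have hsp := spn_pred n (n - t) (by omega)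
    have hjeq : j = n - t - 1 := by omega
    rw [hjeq]
    rw [show n - t - 1 = n - t - 1 from rfl] at hsp ⊢
    rw [hsp]
    push_cast
    ring
  · rw [if_neg hc]
    have hjge : n - t ≤ j := by omega
    have := hent j hjge h2
    rw [PySem.List.pyGetD_eq_getElem _ _ hj0 (by simp [hlen]; omega)] at this
    exact this

lemma finv_fold_spec (n : Int) (hn : 0 ≤ n) (Iv : Int) (t : Nat) (ht : (t : Int) ≤ n) :
    ((PySem.List.pyRange 0 (t : Int) 1).foldl
        (fun l i =>
          PySem.List.pySetD l (n - i - 1)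
            (PySem.List.pyGetD l (n - i) 0 * (n - i) % 998244353))
        (PySem.List.pySetD (PySem.List.pySetD (List.replicate (n + 1).toNat 0) 0 1) (-1) Iv)).length
        = (n + 1).toNat ∧
    ∀ j : Int, n - t ≤ j → j ≤ n →
      ((PySem.List.pyGetD
          ((PySem.List.pyRange 0 (t : Int) 1).foldl
            (fun l i =>
              PySem.List.pySetD l (n - i - 1)
                (PySem.List.pyGetD l (n - i) 0 * (n - i) % 998244353))
            (PySem.List.pySetD (PySem.List.pySetD (List.replicate (n + 1).toNat 0) 0 1) (-1) Iv))
          j 0 : Int) : ZMod 998244353) = (Iv : ZMod 998244353) * spn n j := by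
  induction t with
  | zero =>
      rw [show ((0 : Nat) : Int) = 0 by norm_num, PySem.List.pyRange_one_eq_nil le_rfl]
      simp only [List.foldl_nil]
      have hlen1 : (PySem.List.pySetD (List.replicate (n + 1).toNat 0) 0 (1 : Int)).length
          = (n + 1).toNat := by
        rw [PySem.List.pySetD_of_nonneg _ _ le_rfl]; simp
      have hN : (1:Nat) ≤ (n+1).toNat := by omega
      have hL0 : PySem.List.pySetD (PySem.List.pySetD (List.replicate (n + 1).toNat 0) 0 1) (-1) Iv
          = ((List.replicate (n + 1).toNat (0 : Int)).set 0 1).set ((n + 1).toNat - 1) Iv := by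
        rw [PySem.List.pySetD_of_nonneg _ _ le_rfl]
        unfold PySem.List.pySetD PySem.List.pySet? PySem.List.pyIdx?
        simp only [List.length_set, List.length_replicate]
        rw [if_neg (by omega), if_pos (by omega)]
        simp
      constructor
      · rw [hL0]; simp
      · intro j h1 h2
        have hj : j = n := by omega
        rw [hj]
        have hlen : (((List.replicate (n + 1).toNat (0:Int)).set 0 1).set ((n + 1).toNat - 1) Iv).length = (n+1).toNat := by simp
        rw [hL0, PySem.List.pyGetD_eq_getElem _ _ hn (by rw [hlen]; omega)]
        simp only [List.getElem_set]
        rw [if_pos (by omega), spn_of_ge n n le_rfl]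
        ring
  | succ t ih =>
      have ht' : (t : Int) ≤ n := by push_cast at ht; omega
      obtain ⟨ihlen, ihent⟩ := ih ht'
      rw [show (((t + 1) : Nat) : Int) = (t : Int) + 1 by push_cast; ring,
        PySem.List.pyRange_one_succ_right (by positivity), List.foldl_append]
      simp only [List.foldl_cons, List.foldl_nil]
      exact finv_step n Iv t (by push_cast at ht; omega) _ ihlen ihent


lemma a_loop_spec (n : Int) (F Iv : Int) (L : List Int)
    (hspec : ∀ j : Int, 0 ≤ j → j ≤ n →
      ((PySem.List.pyGetD L j 0 : Int) : ZMod 998244353) = (Iv : ZMod 998244353) * spn n j)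
    (t : Nat) (ht : (t : Int) ≤ n) :
    (0 ≤ ((PySem.List.pyRange 0 (t : Int) 1).foldl
        (fun (st : Int × Int) k =>
          ((st.1 + F * PySem.List.pyGetD L (n - k) 0
              * PySem.List.pyGetD L k 0 * st.2) % 998244353,
           st.2 * 2 % 998244353)) (0, 1)).1 ∧
      ((PySem.List.pyRange 0 (t : Int) 1).foldl
        (fun (st : Int × Int) k =>
          ((st.1 + F * PySem.List.pyGetD L (n - k) 0
              * PySem.List.pyGetD L k 0 * st.2) % 998244353,
           st.2 * 2 % 998244353)) (0, 1)).1 < 998244353) ∧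
    ((((PySem.List.pyRange 0 (t : Int) 1).foldl
        (fun (st : Int × Int) k =>
          ((st.1 + F * PySem.List.pyGetD L (n - k) 0
              * PySem.List.pyGetD L k 0 * st.2) % 998244353,
           st.2 * 2 % 998244353)) (0, 1)).1 : Int) : ZMod 998244353)
      = (F : ZMod 998244353) * (Iv : ZMod 998244353) * (Iv : ZMod 998244353)
          * ∑ k ∈ Finset.range t, spn n (n - k) * spn n k * 2 ^ k ∧
    ((((PySem.List.pyRange 0 (t : Int) 1).foldl
        (fun (st : Int × Int) k =>
          ((st.1 + F * PySem.List.pyGetD L (n - k) 0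
              * PySem.List.pyGetD L k 0 * st.2) % 998244353,
           st.2 * 2 % 998244353)) (0, 1)).2 : Int) : ZMod 998244353) = 2 ^ t := by
  induction t with
  | zero =>
      rw [show ((0 : Nat) : Int) = 0 by norm_num, PySem.List.pyRange_one_eq_nil le_rfl]
      simp
  | succ t ih =>
      obtain ⟨⟨hb0, hb1⟩, hc1, hc2⟩ := ih (by omega)
      rw [show (((t + 1) : Nat) : Int) = (t : Int) + 1 by push_cast; ring,
        PySem.List.pyRange_one_succ_right (by positivity), List.foldl_append]
      simp only [List.foldl_cons, List.foldl_nil]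
      refine ⟨⟨Int.emod_nonneg _ (by norm_num), Int.emod_lt_of_pos _ (by norm_num)⟩, ?_, ?_⟩
      · rw [castP_emod]
        push_cast
        rw [hc1, hc2, hspec (n - t) (by omega) (by omega), hspec (t : Int) (by positivity) (by omega),
          Finset.sum_range_succ]
        ring
      · rw [castP_emod]
        push_cast
        rw [hc2]
        ring


lemma b_fwd_step (n : Int) (t : Nat) (_ht : (t : Int) + 1 ≤ n) (ts : List Int) (ff pw : Int)
    (hlen : ts.length = t)
    (hent : ∀ k : Nat, k < t →
      ((ts.getD k 0 : Int) : ZMod 998244353) = spn n (n - k) * 2 ^ k)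
    (hff : ((ff : Int) : ZMod 998244353) = spn n (n - t))
    (hpw : ((pw : Int) : ZMod 998244353) = 2 ^ t) :
    (ts ++ [ff * pw % 998244353]).length = t + 1 ∧
    (∀ k : Nat, k < t + 1 →
      (((ts ++ [ff * pw % 998244353]).getD k 0 : Int) : ZMod 998244353)
        = spn n (n - k) * 2 ^ k) ∧
    ((ff * (n - t) % 998244353 : Int) : ZMod 998244353) = spn n (n - ((t + 1 : Nat) : Int)) ∧
    ((pw * 2 % 998244353 : Int) : ZMod 998244353) = 2 ^ (t + 1) := by
  refine ⟨by simp [hlen], ?_, ?_, ?_⟩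
  · intro k hk
    by_cases hkt : k < t
    · rw [List.getD_append _ _ _ k (by omega)]
      exact hent k hkt
    · have hkeq : k = t := by omega
      rw [hkeq, List.getD_append_right _ _ _ _ (by omega), hlen, Nat.sub_self,
        List.getD_cons_zero, castP_emod]
      push_cast
      rw [hff, hpw]
  · rw [castP_emod]
    push_cast
    rw [hff]
    have hs := spn_pred n (n - t) (by omega)
    rw [show n - ((t : Int) + 1) = n - t - 1 by ring, hs]
    push_cast
    ring
  · rw [castP_emod]; push_cast; rw [hpw]; ring

lemma b_fwd_spec (n : Int) (t : Nat) (ht : (t : Int) ≤ n) :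
    ((PySem.List.pyRange 0 (t : Int) 1).foldl
        (fun (st : List Int × Int × Int) k =>
          (st.1 ++ [st.2.1 * st.2.2 % 998244353],
           st.2.1 * (n - k) % 998244353,
           st.2.2 * 2 % 998244353)) ([], 1, 1)).1.length = t ∧
    (∀ k : Nat, k < t →
      ((((PySem.List.pyRange 0 (t : Int) 1).foldl
          (fun (st : List Int × Int × Int) k =>
            (st.1 ++ [st.2.1 * st.2.2 % 998244353],
             st.2.1 * (n - k) % 998244353,
             st.2.2 * 2 % 998244353)) ([], 1, 1)).1.getD k 0 : Int) : ZMod 998244353)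
        = spn n (n - k) * 2 ^ k) ∧
    ((((PySem.List.pyRange 0 (t : Int) 1).foldl
        (fun (st : List Int × Int × Int) k =>
          (st.1 ++ [st.2.1 * st.2.2 % 998244353],
           st.2.1 * (n - k) % 998244353,
           st.2.2 * 2 % 998244353)) ([], 1, 1)).2.1 : Int) : ZMod 998244353)
      = spn n (n - t) ∧
    ((((PySem.List.pyRange 0 (t : Int) 1).foldl
        (fun (st : List Int × Int × Int) k =>
          (st.1 ++ [st.2.1 * st.2.2 % 998244353],
           st.2.1 * (n - k) % 998244353,
           st.2.2 * 2 % 998244353)) ([], 1, 1)).2.2 : Int) : ZMod 998244353) = 2 ^ t := by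
  induction t with
  | zero =>
      rw [show ((0 : Nat) : Int) = 0 by norm_num, PySem.List.pyRange_one_eq_nil le_rfl]
      refine ⟨by simp, by simp, ?_, by simp⟩
      simp only [List.foldl_nil]
      rw [show n - (0:Int) = n by ring, spn_of_ge n n le_rfl]
      norm_num
  | succ t ih =>
      obtain ⟨ihlen, ihent, ihff, ihpw⟩ := ih (by omega)
      rw [show (((t + 1) : Nat) : Int) = (t : Int) + 1 by push_cast; ring,
        PySem.List.pyRange_one_succ_right (by positivity), List.foldl_append]
      simp only [List.foldl_cons, List.foldl_nil]
      exact b_fwd_step n t (by push_cast at ht; omega) _ _ _ ihlen ihent ihff ihpw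


lemma b_bwd_spec (n : Int) (ts : List Int) (u : Nat) (hu : (u : Int) ≤ n)
    (q s : Int) (hq0 : 0 ≤ q) (hq1 : q < 998244353)
    (hqc : (q : ZMod 998244353) = spn n u) :
    (0 ≤ ((PySem.List.pyRange ((u : Int) - 1) (-1) (-1)).foldl
        (fun (st : Int × Int) k =>
          ((st.1 * (k + 1) % 998244353),
           (st.2 + PySem.List.pyGetD ts k 0 * (st.1 * (k + 1) % 998244353)) % 998244353))
        (q, s)).1 ∧
      ((PySem.List.pyRange ((u : Int) - 1) (-1) (-1)).foldl
        (fun (st : Int × Int) k =>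
          ((st.1 * (k + 1) % 998244353),
           (st.2 + PySem.List.pyGetD ts k 0 * (st.1 * (k + 1) % 998244353)) % 998244353))
        (q, s)).1 < 998244353) ∧
    ((((PySem.List.pyRange ((u : Int) - 1) (-1) (-1)).foldl
        (fun (st : Int × Int) k =>
          ((st.1 * (k + 1) % 998244353),
           (st.2 + PySem.List.pyGetD ts k 0 * (st.1 * (k + 1) % 998244353)) % 998244353))
        (q, s)).1 : Int) : ZMod 998244353) = spn n 0 ∧
    ((((PySem.List.pyRange ((u : Int) - 1) (-1) (-1)).foldl
        (fun (st : Int × Int) k =>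
          ((st.1 * (k + 1) % 998244353),
           (st.2 + PySem.List.pyGetD ts k 0 * (st.1 * (k + 1) % 998244353)) % 998244353))
        (q, s)).2 : Int) : ZMod 998244353)
      = (s : ZMod 998244353)
          + ∑ k ∈ Finset.range u, ((ts.getD k 0 : Int) : ZMod 998244353) * spn n k := by
  induction u generalizing q s with
  | zero =>
      rw [show ((0 : Nat) : Int) - 1 = -1 by norm_num, PySem.List.pyRange_neg_one_eq_nil le_rfl]
      simp only [List.foldl_nil, Finset.range_zero, Finset.sum_empty]
      refine ⟨⟨hq0, hq1⟩, ?_, by simp⟩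
      rw [hqc]
      norm_num
  | succ u ih =>
      rw [show (((u + 1) : Nat) : Int) - 1 = (u : Int) by push_cast; ring,
        PySem.List.pyRange_neg_one_cons (by omega)]
      simp only [List.foldl_cons]
      have hq' : ((q * ((u : Int) + 1) % 998244353 : Int) : ZMod 998244353) = spn n u := by
        rw [castP_emod]
        push_cast
        rw [hqc]
        have := spn_pred n ((u : Int) + 1) (by omega)
        rw [show (u : Int) + 1 - 1 = (u : Int) by ring] at this
        rw [this]
        push_cast
        ring
      obtain ⟨hb, hc1, hc2⟩ := ih (by omega) (q * ((u : Int) + 1) % 998244353)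
        ((s + PySem.List.pyGetD ts (u : Int) 0 * (q * ((u : Int) + 1) % 998244353)) % 998244353)
        (Int.emod_nonneg _ (by norm_num)) (Int.emod_lt_of_pos _ (by norm_num)) hq'
      refine ⟨hb, hc1, ?_⟩
      rw [hc2, castP_emod]
      push_cast
      rw [hq', Finset.sum_range_succ]
      rw [PySem.List.pyGetD_natCast]
      ring


-- ===== VERDICT (by name: the statement is the Claim_ definition above) =====
theorem solve_spec : Claim_equal_solve := by
  intro n _ hn
  have hn' : (0:Int) ≤ n := hn
  unfold Spec_solve
  simp only [solve, solve_alt]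
  set M : Int := PySem.Int.floordiv n 2 with hMdef
  have hM : M = n / 2 := PySem.Int.floordiv_eq_ediv_of_pos (by norm_num)
  have hM0 : (0:Int) ≤ M := by rw [hM]; omega
  have hMn : M ≤ n := by rw [hM]; omega
  have hMcast : ((M.toNat : Int)) = M := Int.toNat_of_nonneg hM0
  rw [← hMcast]
  -- name the five folds
  set F : Int := (PySem.List.pyRange 1 (n + 1) 1).foldl (fun f i => f * i % 998244353) 1 with hFdef
  set Iv : Int := powModFast F 998244351 998244353 with hIvdef
  set L : List Int := (PySem.List.pyRange 0 n 1).foldl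
      (fun l i =>
        PySem.List.pySetD l (n - i - 1)
          (PySem.List.pyGetD l (n - i) 0 * (n - i) % 998244353))
      (PySem.List.pySetD (PySem.List.pySetD (List.replicate (n + 1).toNat 0) 0 1) (-1) Iv)
      with hLdef
  set rp : Int × Int := (PySem.List.pyRange 0 ((M.toNat : Int)) 1).foldl
      (fun (st : Int × Int) k =>
        ((st.1 + F * PySem.List.pyGetD L (n - k) 0
            * PySem.List.pyGetD L k 0 * st.2) % 998244353,
         st.2 * 2 % 998244353)) (0, 1) with hrpdef
  set fwd : List Int × Int × Int := (PySem.List.pyRange 0 ((M.toNat : Int)) 1).foldl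
      (fun (st : List Int × Int × Int) k =>
        (st.1 ++ [st.2.1 * st.2.2 % 998244353],
         st.2.1 * (n - k) % 998244353,
         st.2.2 * 2 % 998244353)) ([], 1, 1) with hfwddef
  set q1 : Int := (PySem.List.pyRange ((M.toNat : Int) + 1) (n + 1) 1).foldl
      (fun q i => q * i % 998244353) 1 with hq1def
  set bwd : Int × Int := (PySem.List.pyRange ((M.toNat : Int) - 1) (-1) (-1)).foldl
      (fun (st : Int × Int) k =>
        ((st.1 * (k + 1) % 998244353),
         (st.2 + PySem.List.pyGetD fwd.1 k 0 * (st.1 * (k + 1) % 998244353)) % 998244353))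
      (q1, 0) with hbwddef
  -- A side facts
  have hFc : ((F : Int) : ZMod 998244353) = spn n 0 := by
    have h := cast_fact_fold n 0
    norm_num at h
    rw [hFdef]
    exact h
  have hFb := foldl_mul_mod_bounds (PySem.List.pyRange 1 (n + 1) 1) 1 (by norm_num) (by norm_num)
  rw [← hFdef] at hFb
  have hfs := finv_fold_spec n hn' Iv n.toNat (by omega)
  rw [Int.toNat_of_nonneg hn'] at hfs
  rw [← hLdef] at hfs
  obtain ⟨hLlen, hLent⟩ := hfs
  have hA := a_loop_spec n F Iv L (fun j hj0 hjn => hLent j (by omega) hjn)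
      M.toNat (by omega)
  rw [← hrpdef] at hA
  obtain ⟨⟨hA0, hA1⟩, hAc, -⟩ := hA
  -- B side facts
  have hfwd := b_fwd_spec n M.toNat (by omega)
  rw [← hfwddef] at hfwd
  obtain ⟨htslen, htsent, -, -⟩ := hfwd
  have hq1c : ((q1 : Int) : ZMod 998244353) = spn n ((M.toNat : Int)) := by
    rw [hq1def]
    exact cast_fact_fold n ((M.toNat : Int))
  have hq1b := foldl_mul_mod_bounds (PySem.List.pyRange ((M.toNat : Int) + 1) (n + 1) 1) 1
      (by norm_num) (by norm_num)
  rw [← hq1def] at hq1b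
  have hbw := b_bwd_spec n fwd.1 M.toNat (by omega) q1 0 hq1b.1 hq1b.2 hq1c
  rw [← hbwddef] at hbw
  obtain ⟨⟨hB0, hB1⟩, hq2c, hsc⟩ := hbw
  -- the two factorials agree as integers
  have hq2F : bwd.1 = F := eq_of_cast_eq hB0 hB1 hFb.1 hFb.2 (by rw [hq2c, hFc])
  rw [hq2F, ← hIvdef]
  -- the two summation results agree as integers
  have hr : rp.1 = F * Iv % 998244353 * Iv % 998244353 * bwd.2 % 998244353 := by
    apply eq_of_cast_eq hA0 hA1 (Int.emod_nonneg _ (by norm_num)) (Int.emod_lt_of_pos _ (by norm_num))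
    rw [hAc, castP_emod, Int.cast_mul, castP_emod, Int.cast_mul, castP_emod, Int.cast_mul, hsc]
    rw [show ((0 : Int) : ZMod 998244353) = 0 by norm_num]
    rw [Finset.mul_sum, zero_add, Finset.mul_sum]
    apply Finset.sum_congr rfl
    intro k hk
    rw [htsent k (Finset.mem_range.mp hk)]
    ring
  rw [hr]
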